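-- pv_equiv track=rewrite | github.com/JoelBorrero/molova_scrap | Item.py | toInt
-- ===== SOURCE A (Python) =====
-- def toInt(s):
--     if type(s) is float:
--         s = int(s)
--     if not type(s) is int:
--         stf = 0
--         s = ''.join(str(s))
--         for st in s:
--             try:
--                 stf = stf * 10 + int(st)
--             except:
--                 pass
--         return stf
--     else:
--         return s
-- ===== SOURCE B (Python) =====
-- def toInt(s):
--     if type(s) is float:
--         s = int(s)
--     if type(s) is int:
--         return s
--     total = 0
--     place = 1
--     for c in reversed(str(s)):
--         if c.isdecimal():
--             total += int(c) * place
--             place *= 10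
--     return total
-- ===== Notes on version B (the rewrite author's own statement) =====
-- stated objective: alternative
-- what changed: Replaces A's left-to-right Horner fold that attempts int() on every character inside try/except by a right-to-left place-value accumulation (total += digit*place; place *= 10) guarded by isdecimal, so exception handling disappears.
import Mathlib
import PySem

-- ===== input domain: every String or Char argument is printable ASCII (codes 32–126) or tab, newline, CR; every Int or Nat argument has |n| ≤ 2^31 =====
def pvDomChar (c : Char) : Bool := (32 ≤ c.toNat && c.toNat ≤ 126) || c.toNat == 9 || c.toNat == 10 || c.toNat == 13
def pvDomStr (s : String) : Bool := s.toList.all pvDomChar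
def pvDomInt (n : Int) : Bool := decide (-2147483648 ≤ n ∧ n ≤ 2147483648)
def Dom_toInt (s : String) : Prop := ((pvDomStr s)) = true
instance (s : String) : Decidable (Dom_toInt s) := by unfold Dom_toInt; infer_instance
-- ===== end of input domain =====

-- B replaces A's left-to-right Horner fold with try/except by a right-to-left
-- place-value accumulation over decimal characters (objective: alternative).
-- With s : String, A's float/int type guards never fire and are dropped in the port.

-- ===== PORT A =====
-- for st in s: try: stf = stf*10 + int(st) except: pass
def toInt (s : String) : Int :=
  s.toList.foldl (fun stf st =>
    match PySem.Int.ofStr? (String.mk [st]) with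
    | some v => stf * 10 + v
    | none => stf) 0

-- ===== PORT B =====
-- for c in reversed(str(s)): if c.isdecimal(): total += int(c)*place; place *= 10
-- (c.isdecimal() is ported as PySem.Chars.isdigit: they coincide on the ASCII domain)
def toInt_alt (s : String) : Int :=
  (s.toList.reverse.foldl (fun (tp : Int × Int) c =>
    if PySem.Chars.isdigit c then
      (tp.1 + ((PySem.Int.ofStr? (String.mk [c])).getD 0) * tp.2, tp.2 * 10)
    else tp) (0, 1)).1

-- ===== PRECONDITION & SPEC =====
def Spec_toInt (s : String) (out : Int) : Prop := out = toInt_alt s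
instance (s : String) (out : Int) : Decidable (Spec_toInt s out) := by unfold Spec_toInt; infer_instance

-- ===== CLAIM (what is proved, stated in full; the proofs are below) =====
def Claim_equal_toInt : Prop := ∀ (s : String), Dom_toInt s → Spec_toInt s (toInt s)

-- ===== LEMMAS AND PROOFS =====

-- int(c) for a single domain character: a value exactly on '0'..'9'
lemma pv_single_char (c : Char) (h : pvDomChar c = true) :
    PySem.Int.ofStr? (String.mk [c]) =
      if PySem.Chars.isdigit c then some ((c.toNat : Int) - 48) else none := by
  have key : ∀ n : Nat, n < 127 →
      PySem.Int.ofStr? (String.mk [Char.ofNat n]) =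
        if PySem.Chars.isdigit (Char.ofNat n) then some (((Char.ofNat n).toNat : Int) - 48)
        else none := by decide
  have hlt : c.toNat < 127 := by
    simp [pvDomChar] at h
    omega
  have := key c.toNat hlt
  rwa [Char.ofNat_toNat] at this

-- digit values of the decimal characters of a list
def pvDigits (l : List Char) : List Int :=
  (l.filter (fun c => PySem.Chars.isdigit c)).map (fun c => (c.toNat : Int) - 48)

-- value of a digit list read back-to-front with place values
def pvValr : List Int → Int
  | [] => 0
  | d :: ds => d * 10 ^ ds.length + pvValr ds

lemma pv_horner (ds : List Int) : ∀ acc : Int,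
    List.foldl (fun a d => a * 10 + d) acc ds = acc * 10 ^ ds.length + pvValr ds := by
  induction ds with
  | nil => intro acc; simp [pvValr]
  | cons d ds ih =>
    intro acc
    simp only [List.foldl_cons, ih, pvValr, List.length_cons]
    ring

lemma pv_A_fold (l : List Char) (hl : l.all pvDomChar = true) : ∀ acc : Int,
    List.foldl (fun stf st =>
      match PySem.Int.ofStr? (String.mk [st]) with
      | some v => stf * 10 + v
      | none => stf) acc l
    = List.foldl (fun a d => a * 10 + d) acc (pvDigits l) := by
  induction l with
  | nil => intro acc; simp [pvDigits]
  | cons c l ih =>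
    simp only [List.all_cons, Bool.and_eq_true] at hl
    intro acc
    rw [List.foldl_cons, pv_single_char c hl.1]
    by_cases hd : PySem.Chars.isdigit c
    · simp [pvDigits, hd, ih hl.2]
    · simp [pvDigits, hd, ih hl.2]

lemma pv_B_fold (l : List Char) (hl : l.all pvDomChar = true) :
    List.foldr (fun c (tp : Int × Int) =>
      if PySem.Chars.isdigit c then
        (tp.1 + ((PySem.Int.ofStr? (String.mk [c])).getD 0) * tp.2, tp.2 * 10)
      else tp) (0, 1) l
    = (pvValr (pvDigits l), 10 ^ (pvDigits l).length) := by
  induction l with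
  | nil => simp [pvDigits, pvValr]
  | cons c l ih =>
    simp only [List.all_cons, Bool.and_eq_true] at hl
    rw [List.foldr_cons, ih hl.2]
    by_cases hd : PySem.Chars.isdigit c
    · rw [pv_single_char c hl.1]
      simp only [hd, if_true, Option.getD_some]
      simp only [pvDigits, List.filter_cons, hd, if_true, List.map_cons, pvValr,
        List.length_cons, List.length_map]
      refine Prod.ext ?_ ?_ <;> simp <;> ring
    · simp [pvDigits, hd]

-- ===== VERDICT (by name: the statement is the Claim_ definition above) =====
theorem toInt_spec : Claim_equal_toInt := by
  intro s hdom
  unfold Spec_toInt toInt toInt_alt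
  have hl : s.toList.all pvDomChar = true := hdom
  rw [List.foldl_reverse, pv_A_fold s.toList hl 0, pv_horner, pv_B_fold s.toList hl]
  simp
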